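-- pv_equiv track=rewrite | github.com/Doctor3131/PraktikumASA | Pertemuan4/SubstringBaik/SubstringBaik.py | cek
-- ===== SOURCE A (Python) =====
-- def cek(data):
--     setHuruf = set(data)
--     for huruf in setHuruf:
--         if huruf.islower() and huruf.upper() not in setHuruf:
--             return False
--         if huruf.isupper() and huruf.lower() not in setHuruf:
--             return False
--     return True
-- ===== SOURCE B (Python) =====
-- def cek(data):
--     s = set(data)
--     return all((u in s) == (u.lower() in s) for u in "ABCDEFGHIJKLMNOPQRSTUVWXYZ")
-- ===== Notes on version B (the rewrite author's own statement) =====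
-- stated objective: simpler
-- what changed: Instead of scanning the characters of the input with two early-return membership checks per character, B iterates over the fixed 26-letter alphabet and requires, for each letter, that its uppercase and lowercase forms are either both present or both absent in set(data).
import Mathlib
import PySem

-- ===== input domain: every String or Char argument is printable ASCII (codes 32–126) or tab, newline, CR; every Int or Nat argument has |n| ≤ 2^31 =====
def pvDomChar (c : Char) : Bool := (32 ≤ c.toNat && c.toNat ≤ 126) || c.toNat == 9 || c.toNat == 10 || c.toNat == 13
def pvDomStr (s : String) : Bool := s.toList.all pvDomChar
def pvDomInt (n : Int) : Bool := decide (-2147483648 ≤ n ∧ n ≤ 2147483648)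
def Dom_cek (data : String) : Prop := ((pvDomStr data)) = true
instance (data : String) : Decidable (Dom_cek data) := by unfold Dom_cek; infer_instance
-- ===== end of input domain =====

-- B iterates over the fixed alphabet instead of scanning the input's characters; simpler, same cost.

-- ===== PORT A =====
-- the for-loop over set(data) with its two early returns; the result (False iff some
-- element is bad) does not depend on the set's iteration order
def cekLoopA (l : List Char) (s : PySem.Set Char) : Bool :=
  match l with
  | [] => true
  | h :: t =>
    if PySem.Chars.islower h && !(PySem.Set.contains s (PySem.Chars.upperChar h)) then false
    else if PySem.Chars.isupper h && !(PySem.Set.contains s (PySem.Chars.lowerChar h)) then false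
    else cekLoopA t s

def cek (data : String) : Bool :=
  let setHuruf := PySem.Set.ofList data.toList
  cekLoopA setHuruf setHuruf

-- ===== PORT B =====
def cek_alt (data : String) : Bool :=
  let s := PySem.Set.ofList data.toList
  "ABCDEFGHIJKLMNOPQRSTUVWXYZ".toList.all (fun u =>
    PySem.Set.contains s u == PySem.Set.contains s (PySem.Chars.lowerChar u))

-- ===== PRECONDITION & SPEC =====
def Spec_cek (data : String) (out : Bool) : Prop := out = cek_alt data
instance (data : String) (out : Bool) : Decidable (Spec_cek data out) := by unfold Spec_cek; infer_instance

-- ===== CLAIM (what is proved, stated in full; the proofs are below) =====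
def Claim_equal_cek : Prop := ∀ (data : String), Dom_cek data → Spec_cek data (cek data)

-- ===== LEMMAS AND PROOFS =====

theorem cekLoopA_eq_true_iff (l : List Char) (s : PySem.Set Char) :
    cekLoopA l s = true ↔ ∀ h ∈ l,
      (PySem.Chars.islower h = true → PySem.Set.contains s (PySem.Chars.upperChar h) = true) ∧
      (PySem.Chars.isupper h = true → PySem.Set.contains s (PySem.Chars.lowerChar h) = true) := by
  induction l with
  | nil => simp [cekLoopA]
  | cons h t ih =>
    simp only [cekLoopA, List.mem_cons]
    split_ifs with h1 h2
    · simp only [Bool.and_eq_true, Bool.not_eq_true'] at h1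
      constructor
      · intro hf; exact absurd hf (by simp)
      · intro hall
        have := (hall h (Or.inl rfl)).1 h1.1
        rw [this] at h1; exact absurd h1.2 (by simp)
    · simp only [Bool.and_eq_true, Bool.not_eq_true'] at h2
      constructor
      · intro hf; exact absurd hf (by simp)
      · intro hall
        have := (hall h (Or.inl rfl)).2 h2.1
        rw [this] at h2; exact absurd h2.2 (by simp)
    · rw [ih]
      constructor
      · intro hall x hx
        rcases hx with rfl | hx
        · constructor
          · intro hl
            cases hcon : PySem.Set.contains s (PySem.Chars.upperChar x) with
            | true => rfl
            | false => exact absurd (by rw [hl, hcon]; rfl) h1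
          · intro hu
            cases hcon : PySem.Set.contains s (PySem.Chars.lowerChar x) with
            | true => rfl
            | false => exact absurd (by rw [hu, hcon]; rfl) h2
        · exact hall x hx
      · intro hall x hx; exact hall x (Or.inr hx)

theorem contains_true_iff (s : PySem.Set Char) (x : Char) :
    PySem.Set.contains s x = true ↔ x ∈ s := by
  simp [PySem.Set.contains]

-- the alphabet string literal, as an explicit char list
set_option maxRecDepth 4096 in
theorem alpha_list : "ABCDEFGHIJKLMNOPQRSTUVWXYZ".toList = ['A','B','C','D','E','F','G','H','I','J','K','L','M','N','O','P','Q','R','S','T','U','V','W','X','Y','Z'] := by rfl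

-- character facts about the 26 uppercase letters, by evaluation
theorem uc_facts : ∀ u ∈ ['A','B','C','D','E','F','G','H','I','J','K','L','M','N','O','P','Q','R','S','T','U','V','W','X','Y','Z'],
    PySem.Chars.isupper u = true ∧
    PySem.Chars.islower (PySem.Chars.lowerChar u) = true ∧
    PySem.Chars.upperChar (PySem.Chars.lowerChar u) = u := by
  intro u hu; fin_cases hu <;> exact ⟨rfl, rfl, rfl⟩

-- any char with islower ( resp. isupper ) is the lowerChar (resp. itself) of a letter in the alphabet list
theorem lower_shape : ∀ n ∈ List.range 26,
    PySem.Chars.upperChar (Char.ofNat (97 + n)) ∈ ['A','B','C','D','E','F','G','H','I','J','K','L','M','N','O','P','Q','R','S','T','U','V','W','X','Y','Z'] ∧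
    PySem.Chars.lowerChar (PySem.Chars.upperChar (Char.ofNat (97 + n))) = Char.ofNat (97 + n) := by
  intro n hn
  rw [List.mem_range] at hn
  interval_cases n <;> exact ⟨by decide, by decide⟩

theorem upper_shape : ∀ n ∈ List.range 26,
    Char.ofNat (65 + n) ∈ ['A','B','C','D','E','F','G','H','I','J','K','L','M','N','O','P','Q','R','S','T','U','V','W','X','Y','Z'] := by
  intro n hn
  rw [List.mem_range] at hn
  interval_cases n <;> decide

theorem toNat_bounds_of_islower (h : Char) (hl : PySem.Chars.islower h = true) :
    97 ≤ h.toNat ∧ h.toNat ≤ 122 := by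
  simp only [PySem.Chars.islower, Bool.and_eq_true, decide_eq_true_eq, Char.le_def] at hl
  constructor <;> [exact hl.1; exact hl.2]

theorem toNat_bounds_of_isupper (h : Char) (hu : PySem.Chars.isupper h = true) :
    65 ≤ h.toNat ∧ h.toNat ≤ 90 := by
  simp only [PySem.Chars.isupper, Bool.and_eq_true, decide_eq_true_eq, Char.le_def] at hu
  constructor <;> [exact hu.1; exact hu.2]

theorem ofNat_toNat_char (c : Char) : Char.ofNat c.toNat = c := by
  exact Char.ofNat_toNat c

-- ===== VERDICT (by name: the statement is the Claim_ definition above) =====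
theorem cek_spec : Claim_equal_cek := by
  intro data _
  unfold Spec_cek cek cek_alt
  set s := PySem.Set.ofList data.toList with hs
  rw [Bool.eq_iff_iff, cekLoopA_eq_true_iff, alpha_list, List.all_eq_true]
  constructor
  · -- A true → B true
    intro hall u hu
    obtain ⟨hup, hll, hul⟩ := uc_facts u hu
    rw [beq_iff_eq, Bool.eq_iff_iff]
    simp only [contains_true_iff]
    constructor
    · intro hmem
      exact contains_true_iff s _ |>.mp ((hall u hmem).2 hup)
    · intro hmem
      have := (hall (PySem.Chars.lowerChar u) hmem).1 hll
      rw [hul] at this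
      exact contains_true_iff s _ |>.mp this
  · -- B true → A true
    intro hall h hmem
    constructor
    · intro hl
      obtain ⟨h1, h2⟩ := toNat_bounds_of_islower h hl
      have hn : h.toNat - 97 ∈ List.range 26 := by simp only [List.mem_range]; omega
      have heq : Char.ofNat (97 + (h.toNat - 97)) = h := by
        have : 97 + (h.toNat - 97) = h.toNat := by omega
        rw [this, ofNat_toNat_char]
      obtain ⟨hmemUC, hround⟩ := lower_shape _ hn
      rw [heq] at hmemUC hround
      have := hall _ hmemUC
      rw [beq_iff_eq, Bool.eq_iff_iff] at this
      rw [hround] at this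
      exact this.2 ((contains_true_iff s _).mpr hmem)
    · intro hu
      obtain ⟨h1, h2⟩ := toNat_bounds_of_isupper h hu
      have hn : h.toNat - 65 ∈ List.range 26 := by simp only [List.mem_range]; omega
      have heq : Char.ofNat (65 + (h.toNat - 65)) = h := by
        have : 65 + (h.toNat - 65) = h.toNat := by omega
        rw [this, ofNat_toNat_char]
      have hmemUC := upper_shape _ hn
      rw [heq] at hmemUC
      have := hall _ hmemUC
      rw [beq_iff_eq, Bool.eq_iff_iff] at this
      exact this.1 ((contains_true_iff s _).mpr hmem)
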